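-- pv_equiv track=rewrite | github.com/jgadelugo/einsteinBot | ui/components/proof_trace/proof_visualizer.py | _convert_to_latex
-- ===== SOURCE A (Python) =====
-- def _convert_to_latex(expression: str) -> str:
--     """Convert expression to LaTeX format."""
--     if not expression:
--         return expression
--
--     # Basic LaTeX cleanup
--     latex_expr = expression.strip()
--
--     # Remove common Python/SymPy syntax that doesn't work in LaTeX
--     replacements = {
--         '**': '^',
--         '*': r' \cdot ',
--         'sqrt(': r'\sqrt{',
--         'sin(': r'\sin(',
--         'cos(': r'\cos(',
--         'tan(': r'\tan(',
--         'log(': r'\log(',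
--         'ln(': r'\ln(',
--         'exp(': r'\exp(',
--     }
--
--     for old, new in replacements.items():
--         latex_expr = latex_expr.replace(old, new)
--
--     return latex_expr
-- ===== SOURCE B (Python) =====
-- # Alternative implementation: one left-to-right scan over the stripped expression, emitting
-- # the replacement for the first token (from an ordered table, '**' before '*') that matches
-- # at each position, instead of nine sequential full-string .replace passes.
--
-- _TOKENS = [
--     ('**', '^'),
--     ('*', r' \cdot '),
--     ('sqrt(', r'\sqrt{'),
--     ('sin(', r'\sin('),
--     ('cos(', r'\cos('),
--     ('tan(', r'\tan('),
--     ('log(', r'\log('),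
--     ('ln(', r'\ln('),
--     ('exp(', r'\exp('),
-- ]
--
--
-- def _convert_to_latex(expression: str) -> str:
--     """Convert expression to LaTeX format."""
--     if not expression:
--         return expression
--
--     s = expression.strip()
--     out = []
--     i = 0
--     n = len(s)
--     while i < n:
--         for old, new in _TOKENS:
--             if s.startswith(old, i):
--                 out.append(new)
--                 i += len(old)
--                 break
--         else:
--             out.append(s[i])
--             i += 1
--     return ''.join(out)
-- ===== Notes on version B (the rewrite author's own statement) =====
-- stated objective: alternative
-- what changed: B replaces the nine sequential full-string .replace passes by a single left-to-right scan that, at each position, emits the replacement of the first matching token from an ordered table ('**' before '*').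
import Mathlib
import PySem

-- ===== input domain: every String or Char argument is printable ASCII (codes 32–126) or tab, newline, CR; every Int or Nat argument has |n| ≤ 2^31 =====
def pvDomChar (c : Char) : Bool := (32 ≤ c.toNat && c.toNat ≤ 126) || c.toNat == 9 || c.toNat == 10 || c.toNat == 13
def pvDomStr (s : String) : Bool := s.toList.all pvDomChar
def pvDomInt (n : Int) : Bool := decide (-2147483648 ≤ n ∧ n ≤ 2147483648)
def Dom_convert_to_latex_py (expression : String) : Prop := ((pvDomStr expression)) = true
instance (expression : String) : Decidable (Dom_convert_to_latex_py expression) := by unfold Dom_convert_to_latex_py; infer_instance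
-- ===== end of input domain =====

-- Alternative implementation: B replaces A's nine sequential full-string .replace passes by one
-- left-to-right scan of the stripped string, emitting the replacement of the first matching token.

-- ===== PORT A =====
-- The Python dict of replacements, in insertion order (dict → association list).
def pvReplacements : List (String × String) :=
  [("**", "^"), ("*", " \\cdot "), ("sqrt(", "\\sqrt{"), ("sin(", "\\sin("),
   ("cos(", "\\cos("), ("tan(", "\\tan("), ("log(", "\\log("), ("ln(", "\\ln("),
   ("exp(", "\\exp(")]

def convert_to_latex_py (expression : String) : String :=
  if expression = "" then expression
  else
    -- for old, new in replacements.items(): latex_expr = latex_expr.replace(old, new)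
    pvReplacements.foldl (fun latex p => PySem.Str.replace latex p.1 p.2)
      (PySem.Str.strip expression)

-- ===== PORT B =====
-- Source B's ordered token table _TOKENS (tokens and replacements as character lists).
def tk1 : List Char := ['*', '*']
def rp1 : List Char := ['^']
def tk2 : List Char := ['*']
def rp2 : List Char := [' ', '\\', 'c', 'd', 'o', 't', ' ']
def tk3 : List Char := ['s', 'q', 'r', 't', '(']
def rp3 : List Char := ['\\', 's', 'q', 'r', 't', '{']
def tk4 : List Char := ['s', 'i', 'n', '(']
def rp4 : List Char := ['\\', 's', 'i', 'n', '(']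
def tk5 : List Char := ['c', 'o', 's', '(']
def rp5 : List Char := ['\\', 'c', 'o', 's', '(']
def tk6 : List Char := ['t', 'a', 'n', '(']
def rp6 : List Char := ['\\', 't', 'a', 'n', '(']
def tk7 : List Char := ['l', 'o', 'g', '(']
def rp7 : List Char := ['\\', 'l', 'o', 'g', '(']
def tk8 : List Char := ['l', 'n', '(']
def rp8 : List Char := ['\\', 'l', 'n', '(']
def tk9 : List Char := ['e', 'x', 'p', '(']
def rp9 : List Char := ['\\', 'e', 'x', 'p', '(']

def pvTokens : List (List Char × List Char) :=
  [(tk1, rp1), (tk2, rp2), (tk3, rp3), (tk4, rp4), (tk5, rp5),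
   (tk6, rp6), (tk7, rp7), (tk8, rp8), (tk9, rp9)]

-- Source B's while-loop: at each position, emit the replacement of the first token that matches
-- there and jump over it, else copy the character.  Every token is nonempty, so dropping
-- `p.1.length - 1` characters of `t` consumes exactly `p.1.length` characters of `c :: t`.
def scanTok : List Char → List Char
  | [] => []
  | c :: t =>
    match pvTokens.find? (fun p => p.1.isPrefixOf (c :: t)) with
    | some p => p.2 ++ scanTok (t.drop (p.1.length - 1))
    | none => c :: scanTok t
termination_by l => l.length
decreasing_by
  · simp only [List.length_drop, List.length_cons]; omega
  · simp only [List.length_cons]; omega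

def convert_to_latex_py_alt (expression : String) : String :=
  if expression = "" then expression
  else String.ofList (scanTok (PySem.Chars.strip expression.toList))

-- ===== PRECONDITION & SPEC =====
def Spec_convert_to_latex_py (expression : String) (out : String) : Prop := out = convert_to_latex_py_alt expression
instance (expression : String) (out : String) : Decidable (Spec_convert_to_latex_py expression out) := by unfold Spec_convert_to_latex_py; infer_instance

-- ===== CLAIM (what is proved, stated in full; the proofs are below) =====
def Claim_equal_convert_to_latex_py : Prop := ∀ (expression : String), Dom_convert_to_latex_py expression → Spec_convert_to_latex_py expression (convert_to_latex_py expression)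

-- ===== LEMMAS AND PROOFS =====


theorem isPrefixOf_false {a b : List Char} (h : ¬ a.isPrefixOf b = true) :
    a.isPrefixOf b = false := by
  cases hx : a.isPrefixOf b
  · rfl
  · exact absurd hx h

-- Clean structural form of Python str.replace (= PySem.Chars.replace for a nonempty pattern).
def repc (old new : List Char) : List Char → List Char
  | [] => []
  | c :: t =>
    if h : old ≠ [] ∧ old.isPrefixOf (c :: t) = true then -- (h is used by decreasing_by)
      new ++ repc old new ((c :: t).drop old.length)
    else c :: repc old new t
termination_by l => l.length
decreasing_by
  · have hpos : 0 < old.length := List.length_pos_iff.mpr h.1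
    simp only [List.length_drop, List.length_cons]; omega
  · simp only [List.length_cons]; omega

theorem repc_nil (old new : List Char) : repc old new [] = [] := by simp [repc]

theorem repc_pos (old new l : List Char) (h1 : old ≠ []) (h2 : old.isPrefixOf l = true) :
    repc old new l = new ++ repc old new (l.drop old.length) := by
  cases l with
  | nil =>
    cases old with
    | nil => exact absurd rfl h1
    | cons a as => simp [List.isPrefixOf] at h2
  | cons c t => rw [repc]; rw [dif_pos ⟨h1, h2⟩]

theorem repc_neg (old new : List Char) (c : Char) (t : List Char)
    (h : old.isPrefixOf (c :: t) = false) :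
    repc old new (c :: t) = c :: repc old new t := by
  rw [repc]; rw [dif_neg (by simp [h])]

theorem go_eq_repc (old new : List Char) (hold : old ≠ []) :
    ∀ (fuel : Nat) (l acc : List Char), l.length ≤ fuel →
      PySem.Chars.replace.go old new fuel l acc = acc.reverse ++ repc old new l := by
  intro fuel
  induction fuel with
  | zero =>
    intro l acc h
    have hl : l = [] := by cases l with
      | nil => rfl
      | cons a as => simp at h
    subst hl
    simp [PySem.Chars.replace.go, repc_nil]
  | succ n ih =>
    intro l acc h
    cases l with
    | nil => simp [PySem.Chars.replace.go, repc_nil]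
    | cons c t =>
      rw [PySem.Chars.replace.go]
      by_cases hp : old.isPrefixOf (c :: t) = true
      · rw [if_pos hp]
        have hpos : 0 < old.length := List.length_pos_iff.mpr hold
        have hlen : ((c :: t).drop old.length).length ≤ n := by
          simp only [List.length_drop, List.length_cons]
          simp only [List.length_cons] at h
          omega
        rw [ih _ _ hlen, repc_pos old new (c :: t) hold hp]
        simp
      · rw [if_neg hp]
        have hlen : t.length ≤ n := by simp only [List.length_cons] at h; omega
        rw [ih _ _ hlen, repc_neg old new c t (isPrefixOf_false hp)]
        simp

theorem replace_eq_repc (l old new : List Char) (hold : old ≠ []) :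
    PySem.Chars.replace l old new = repc old new l := by
  rw [PySem.Chars.replace]
  rw [if_neg (by simp [List.isEmpty_iff, hold])]
  simpa using go_eq_repc old new hold l.length l [] le_rfl

-- `noTouch a b`: no suffix of `a` is prefix-comparable with `b` — so `b` matches neither inside
-- `a` nor straddling the boundary of `a` with anything appended after it.
def noTouch (a b : List Char) : Bool :=
  (List.range a.length).all fun p => !((a.drop p).isPrefixOf b) && !(b.isPrefixOf (a.drop p))

theorem noTouch_spec {a b : List Char} (h : noTouch a b = true) {p : Nat} (hp : p < a.length) :
    ¬(a.drop p <+: b) ∧ ¬(b <+: a.drop p) := by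
  simp only [noTouch, List.all_eq_true, List.mem_range] at h
  have hh := h p hp
  simp only [Bool.and_eq_true, Bool.not_eq_true'] at hh
  constructor
  · intro hc; rw [List.isPrefixOf_iff_prefix.mpr hc] at hh; exact absurd hh.1 (by simp)
  · intro hc; rw [List.isPrefixOf_iff_prefix.mpr hc] at hh; exact absurd hh.2 (by simp)

theorem noTouch_tail {c : Char} {s b : List Char} (h : noTouch (c :: s) b = true) :
    noTouch s b = true := by
  simp only [noTouch, List.all_eq_true, List.mem_range] at h ⊢
  intro p hp
  have := h (p + 1) (by simp only [List.length_cons]; omega)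
  simpa using this

theorem noTouch_head {a b : List Char} (ha : a ≠ []) (h : noTouch a b = true) :
    ¬(a <+: b) ∧ ¬(b <+: a) := by
  have := noTouch_spec h (p := 0) (List.length_pos_iff.mpr ha)
  simpa using this

-- If `s` survives as a prefix through one replace pass, it was already a prefix before.
theorem prefStable (old new : List Char) (hold : old ≠ []) :
    ∀ (n : Nat) (m s : List Char), m.length ≤ n → s ≠ [] → noTouch s new = true →
      s <+: repc old new m → s <+: m := by
  intro n
  induction n with
  | zero =>
    intro m s hm hs _ hp
    have hmnil : m = [] := by cases m with
      | nil => rfl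
      | cons a as => simp at hm
    subst hmnil
    rw [repc_nil] at hp
    exact absurd (List.prefix_nil.mp hp) hs
  | succ n ih =>
    intro m s hm hs hN hp
    cases m with
    | nil =>
      rw [repc_nil] at hp
      exact absurd (List.prefix_nil.mp hp) hs
    | cons c t =>
      by_cases hc : old.isPrefixOf (c :: t) = true
      · rw [repc_pos old new (c :: t) hold hc] at hp
        rcases List.prefix_or_prefix_of_prefix hp (List.prefix_append new _) with h | h
        · exact absurd h (noTouch_head hs hN).1
        · exact absurd h (noTouch_head hs hN).2
      · rw [repc_neg old new c t (isPrefixOf_false hc)] at hp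
        cases s with
        | nil => exact absurd rfl hs
        | cons a s' =>
          obtain ⟨hac, hs'⟩ := List.cons_prefix_cons.mp hp
          subst hac
          cases s' with
          | nil => exact List.cons_prefix_cons.mpr ⟨rfl, List.nil_prefix⟩
          | cons b s'' =>
            have hlen : t.length ≤ n := by simp only [List.length_cons] at hm; omega
            have := ih t (b :: s'') hlen (by simp) (noTouch_tail hN) hs'
            exact List.cons_prefix_cons.mpr ⟨rfl, this⟩

-- A replace pass slides over a block `a` that the pattern cannot touch.
theorem repc_shift (old new : List Char) (_hold : old ≠ []) :
    ∀ (a : List Char), noTouch a old = true →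
      ∀ m, repc old new (a ++ m) = a ++ repc old new m := by
  intro a
  induction a with
  | nil => intro _ m; simp
  | cons c a' ih =>
    intro hN m
    have hnp : old.isPrefixOf ((c :: a') ++ m) = false := by
      refine isPrefixOf_false fun hcon => ?_
      have h1 : old <+: (c :: a') ++ m := List.isPrefixOf_iff_prefix.mp hcon
      rcases List.prefix_or_prefix_of_prefix h1 (List.prefix_append (c :: a') m) with h | h
      · exact absurd h (noTouch_head (by simp) hN).2
      · exact absurd h (noTouch_head (by simp) hN).1
    rw [List.cons_append, repc_neg old new c (a' ++ m) (by simpa using hnp)]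
    rw [ih (noTouch_tail hN) m]
    rfl

-- The fold of replace passes (A's loop, on character lists).
def chainRep (ps : List (List Char × List Char)) (l : List Char) : List Char :=
  ps.foldl (fun acc p => repc p.1 p.2 acc) l

theorem chainRep_append (xs ys : List (List Char × List Char)) (l : List Char) :
    chainRep (xs ++ ys) l = chainRep ys (chainRep xs l) := by
  simp [chainRep, List.foldl_append]

theorem chain_shift :
    ∀ (ps : List (List Char × List Char)) (a m : List Char),
      (∀ p ∈ ps, p.1 ≠ [] ∧ noTouch a p.1 = true) →
      chainRep ps (a ++ m) = a ++ chainRep ps m := by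
  intro ps
  induction ps with
  | nil => intro a m _; rfl
  | cons p ps ih =>
    intro a m h
    have hp := h p List.mem_cons_self
    show chainRep ps (repc p.1 p.2 (a ++ m)) = a ++ chainRep ps (repc p.1 p.2 m)
    rw [repc_shift p.1 p.2 hp.1 a hp.2 m]
    exact ih a (repc p.1 p.2 m) (fun q hq => h q (List.mem_cons_of_mem p hq))

-- If no token matches at the head, the whole chain of passes keeps the head character.
theorem chain_cons :
    ∀ (ps : List (List Char × List Char)) (c : Char) (m : List Char),
      (∀ p ∈ ps, p.1 ≠ []) →
      (∀ p ∈ ps, p.1.isPrefixOf (c :: m) = false) →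
      List.Pairwise (fun p q => noTouch q.1.tail p.2 = true) ps →
      chainRep ps (c :: m) = c :: chainRep ps m := by
  intro ps
  induction ps with
  | nil => intro c m _ _ _; rfl
  | cons p ps ih =>
    intro c m hne hpf hpw
    have h1 : repc p.1 p.2 (c :: m) = c :: repc p.1 p.2 m :=
      repc_neg _ _ _ _ (hpf p List.mem_cons_self)
    obtain ⟨hpw1, hpw2⟩ := List.pairwise_cons.mp hpw
    have hpf' : ∀ q ∈ ps, q.1.isPrefixOf (c :: repc p.1 p.2 m) = false := by
      intro q hq
      refine isPrefixOf_false fun hcon => ?_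
      have hq2 : q.1 <+: c :: repc p.1 p.2 m := List.isPrefixOf_iff_prefix.mp hcon
      cases hqe : q.1 with
      | nil => exact hne q (List.mem_cons_of_mem p hq) hqe
      | cons a s =>
        rw [hqe] at hq2
        obtain ⟨hac, hs⟩ := List.cons_prefix_cons.mp hq2
        have hNq : noTouch s p.2 = true := by
          have := hpw1 q hq; rw [hqe] at this; exact this
        have hqm : q.1 <+: c :: m := by
          rw [hqe]
          refine List.cons_prefix_cons.mpr ⟨hac, ?_⟩
          cases s with
          | nil => exact List.nil_prefix
          | cons b s' =>
            exact prefStable p.1 p.2 (hne p List.mem_cons_self) m.length m (b :: s')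
              le_rfl (by simp) hNq hs
        have hx := hpf q (List.mem_cons_of_mem p hq)
        rw [List.isPrefixOf_iff_prefix.mpr hqm] at hx
        exact absurd hx (by simp)
    show chainRep ps (repc p.1 p.2 (c :: m)) = c :: chainRep ps (repc p.1 p.2 m)
    rw [h1]
    exact ih c (repc p.1 p.2 m) (fun q hq => hne q (List.mem_cons_of_mem p hq)) hpf' hpw2

-- If token tk matches at the head (and earlier passes cannot touch tk, later passes cannot
-- touch its replacement rk), the whole chain rewrites the head occurrence and moves on.
theorem chain_match (pre post : List (List Char × List Char)) (tk rk m : List Char)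
    (htk : tk ≠ [])
    (hpre : ∀ p ∈ pre, p.1 ≠ [] ∧ noTouch tk p.1 = true)
    (hpost : ∀ p ∈ post, p.1 ≠ [] ∧ noTouch rk p.1 = true) :
    chainRep (pre ++ (tk, rk) :: post) (tk ++ m)
      = rk ++ chainRep (pre ++ (tk, rk) :: post) m := by
  rw [chainRep_append, chainRep_append]
  rw [chain_shift pre tk m hpre]
  show chainRep post (repc tk rk (tk ++ chainRep pre m))
      = rk ++ chainRep post (repc tk rk (chainRep pre m))
  rw [repc_pos tk rk _ htk (List.isPrefixOf_iff_prefix.mpr (List.prefix_append tk _))]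
  rw [List.drop_left]
  exact chain_shift post rk _ hpost

-- The central equivalence: nine sequential replace passes = one first-match scan.
theorem chain_eq_scan : ∀ (n : Nat) (l : List Char), l.length ≤ n →
    chainRep pvTokens l = scanTok l := by
  intro n
  induction n with
  | zero =>
    intro l h
    have hl : l = [] := by cases l with
      | nil => rfl
      | cons a as => simp at h
    subst hl
    simp [chainRep, pvTokens, repc_nil, scanTok]
  | succ n ih =>
    intro l hl
    cases l with
    | nil => simp [chainRep, pvTokens, repc_nil, scanTok]
    | cons c t =>
      by_cases h1 : tk1.isPrefixOf (c :: t) = true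
      · -- '**'
        obtain ⟨m, hm⟩ := List.isPrefixOf_iff_prefix.mp h1
        simp only [tk1, List.cons_append, List.nil_append, List.cons.injEq] at hm
        obtain ⟨hc, ht⟩ := hm
        subst hc; subst ht
        have hch : chainRep pvTokens ('*' :: '*' :: m) = rp1 ++ chainRep pvTokens m :=
          chain_match [] [(tk2, rp2), (tk3, rp3), (tk4, rp4), (tk5, rp5), (tk6, rp6),
            (tk7, rp7), (tk8, rp8), (tk9, rp9)] tk1 rp1 m (by decide) (by decide) (by decide)
        have hscan : scanTok ('*' :: '*' :: m) = rp1 ++ scanTok m := by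
          rw [scanTok]
          simp [pvTokens, tk1, List.isPrefixOf]
        rw [hch, hscan, ih m (by simp only [List.length_cons] at hl; omega)]
      · by_cases h2 : tk2.isPrefixOf (c :: t) = true
        · -- '*' (with '**' not matching)
          have hc : c = '*' := by simp [tk2, List.isPrefixOf] at h2; exact h2.symm
          subst hc
          have e1 : repc tk1 rp1 ('*' :: t) = '*' :: repc tk1 rp1 t :=
            repc_neg _ _ _ _ (isPrefixOf_false h1)
          have e2 : repc tk2 rp2 ('*' :: repc tk1 rp1 t)
              = rp2 ++ repc tk2 rp2 (repc tk1 rp1 t) := by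
            rw [repc_pos tk2 rp2 _ (by decide) (by simp [tk2, List.isPrefixOf])]
            simp [tk2]
          have hrest : ∀ p ∈ [(tk3, rp3), (tk4, rp4), (tk5, rp5), (tk6, rp6),
              (tk7, rp7), (tk8, rp8), (tk9, rp9)], p.1 ≠ [] ∧ noTouch rp2 p.1 = true := by decide
          have hch : chainRep pvTokens ('*' :: t) = rp2 ++ chainRep pvTokens t := by
            show chainRep [(tk3, rp3), (tk4, rp4), (tk5, rp5), (tk6, rp6), (tk7, rp7),
                (tk8, rp8), (tk9, rp9)] (repc tk2 rp2 (repc tk1 rp1 ('*' :: t)))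
              = rp2 ++ chainRep [(tk3, rp3), (tk4, rp4), (tk5, rp5), (tk6, rp6), (tk7, rp7),
                (tk8, rp8), (tk9, rp9)] (repc tk2 rp2 (repc tk1 rp1 t))
            rw [e1, e2]
            exact chain_shift _ rp2 _ hrest
          have hscan : scanTok ('*' :: t) = rp2 ++ scanTok t := by
            have h1' : (['*'] : List Char).isPrefixOf t = false := isPrefixOf_false h1
            rw [scanTok]
            simp [pvTokens, List.find?, tk1, tk2, List.isPrefixOf, h1']
          rw [hch, hscan, ih t (by simp only [List.length_cons] at hl; omega)]
        · by_cases h3 : tk3.isPrefixOf (c :: t) = true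
          · obtain ⟨m, hm⟩ := List.isPrefixOf_iff_prefix.mp h3
            simp only [tk3, List.cons_append, List.nil_append, List.cons.injEq] at hm
            obtain ⟨hc, ht⟩ := hm
            subst hc; subst ht
            have hch : chainRep pvTokens ('s' :: 'q' :: 'r' :: 't' :: '(' :: m)
                = rp3 ++ chainRep pvTokens m :=
              chain_match [(tk1, rp1), (tk2, rp2)]
                [(tk4, rp4), (tk5, rp5), (tk6, rp6), (tk7, rp7), (tk8, rp8), (tk9, rp9)]
                tk3 rp3 m (by decide) (by decide) (by decide)
            have hscan : scanTok ('s' :: 'q' :: 'r' :: 't' :: '(' :: m) = rp3 ++ scanTok m := by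
              rw [scanTok]
              simp [pvTokens, List.find?, tk1, tk2, tk3, List.isPrefixOf]
            rw [hch, hscan, ih m (by simp only [List.length_cons] at hl; omega)]
          · by_cases h4 : tk4.isPrefixOf (c :: t) = true
            · obtain ⟨m, hm⟩ := List.isPrefixOf_iff_prefix.mp h4
              simp only [tk4, List.cons_append, List.nil_append, List.cons.injEq] at hm
              obtain ⟨hc, ht⟩ := hm
              subst hc; subst ht
              have hch : chainRep pvTokens ('s' :: 'i' :: 'n' :: '(' :: m)
                  = rp4 ++ chainRep pvTokens m :=
                chain_match [(tk1, rp1), (tk2, rp2), (tk3, rp3)]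
                  [(tk5, rp5), (tk6, rp6), (tk7, rp7), (tk8, rp8), (tk9, rp9)]
                  tk4 rp4 m (by decide) (by decide) (by decide)
              have hscan : scanTok ('s' :: 'i' :: 'n' :: '(' :: m) = rp4 ++ scanTok m := by
                rw [scanTok]
                simp [pvTokens, List.find?, tk1, tk2, tk3, tk4, List.isPrefixOf]
              rw [hch, hscan, ih m (by simp only [List.length_cons] at hl; omega)]
            · by_cases h5 : tk5.isPrefixOf (c :: t) = true
              · obtain ⟨m, hm⟩ := List.isPrefixOf_iff_prefix.mp h5
                simp only [tk5, List.cons_append, List.nil_append, List.cons.injEq] at hm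
                obtain ⟨hc, ht⟩ := hm
                subst hc; subst ht
                have hch : chainRep pvTokens ('c' :: 'o' :: 's' :: '(' :: m)
                    = rp5 ++ chainRep pvTokens m :=
                  chain_match [(tk1, rp1), (tk2, rp2), (tk3, rp3), (tk4, rp4)]
                    [(tk6, rp6), (tk7, rp7), (tk8, rp8), (tk9, rp9)]
                    tk5 rp5 m (by decide) (by decide) (by decide)
                have hscan : scanTok ('c' :: 'o' :: 's' :: '(' :: m) = rp5 ++ scanTok m := by
                  rw [scanTok]
                  simp [pvTokens, List.find?, tk1, tk2, tk3, tk4, tk5, List.isPrefixOf]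
                rw [hch, hscan, ih m (by simp only [List.length_cons] at hl; omega)]
              · by_cases h6 : tk6.isPrefixOf (c :: t) = true
                · obtain ⟨m, hm⟩ := List.isPrefixOf_iff_prefix.mp h6
                  simp only [tk6, List.cons_append, List.nil_append, List.cons.injEq] at hm
                  obtain ⟨hc, ht⟩ := hm
                  subst hc; subst ht
                  have hch : chainRep pvTokens ('t' :: 'a' :: 'n' :: '(' :: m)
                      = rp6 ++ chainRep pvTokens m :=
                    chain_match [(tk1, rp1), (tk2, rp2), (tk3, rp3), (tk4, rp4), (tk5, rp5)]
                      [(tk7, rp7), (tk8, rp8), (tk9, rp9)]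
                      tk6 rp6 m (by decide) (by decide) (by decide)
                  have hscan : scanTok ('t' :: 'a' :: 'n' :: '(' :: m) = rp6 ++ scanTok m := by
                    rw [scanTok]
                    simp [pvTokens, List.find?, tk1, tk2, tk3, tk4, tk5, tk6, List.isPrefixOf]
                  rw [hch, hscan, ih m (by simp only [List.length_cons] at hl; omega)]
                · by_cases h7 : tk7.isPrefixOf (c :: t) = true
                  · obtain ⟨m, hm⟩ := List.isPrefixOf_iff_prefix.mp h7
                    simp only [tk7, List.cons_append, List.nil_append, List.cons.injEq] at hm
                    obtain ⟨hc, ht⟩ := hm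
                    subst hc; subst ht
                    have hch : chainRep pvTokens ('l' :: 'o' :: 'g' :: '(' :: m)
                        = rp7 ++ chainRep pvTokens m :=
                      chain_match [(tk1, rp1), (tk2, rp2), (tk3, rp3), (tk4, rp4), (tk5, rp5),
                          (tk6, rp6)] [(tk8, rp8), (tk9, rp9)]
                        tk7 rp7 m (by decide) (by decide) (by decide)
                    have hscan : scanTok ('l' :: 'o' :: 'g' :: '(' :: m) = rp7 ++ scanTok m := by
                      rw [scanTok]
                      simp [pvTokens, List.find?, tk1, tk2, tk3, tk4, tk5, tk6, tk7,
                        List.isPrefixOf]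
                    rw [hch, hscan, ih m (by simp only [List.length_cons] at hl; omega)]
                  · by_cases h8 : tk8.isPrefixOf (c :: t) = true
                    · obtain ⟨m, hm⟩ := List.isPrefixOf_iff_prefix.mp h8
                      simp only [tk8, List.cons_append, List.nil_append, List.cons.injEq] at hm
                      obtain ⟨hc, ht⟩ := hm
                      subst hc; subst ht
                      have hch : chainRep pvTokens ('l' :: 'n' :: '(' :: m)
                          = rp8 ++ chainRep pvTokens m :=
                        chain_match [(tk1, rp1), (tk2, rp2), (tk3, rp3), (tk4, rp4), (tk5, rp5),
                            (tk6, rp6), (tk7, rp7)] [(tk9, rp9)]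
                          tk8 rp8 m (by decide) (by decide) (by decide)
                      have hscan : scanTok ('l' :: 'n' :: '(' :: m) = rp8 ++ scanTok m := by
                        rw [scanTok]
                        simp [pvTokens, List.find?, tk1, tk2, tk3, tk4, tk5, tk6, tk7, tk8,
                          List.isPrefixOf]
                      rw [hch, hscan, ih m (by simp only [List.length_cons] at hl; omega)]
                    · by_cases h9 : tk9.isPrefixOf (c :: t) = true
                      · obtain ⟨m, hm⟩ := List.isPrefixOf_iff_prefix.mp h9
                        simp only [tk9, List.cons_append, List.nil_append, List.cons.injEq] at hm
                        obtain ⟨hc, ht⟩ := hm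
                        subst hc; subst ht
                        have hch : chainRep pvTokens ('e' :: 'x' :: 'p' :: '(' :: m)
                            = rp9 ++ chainRep pvTokens m :=
                          chain_match [(tk1, rp1), (tk2, rp2), (tk3, rp3), (tk4, rp4), (tk5, rp5),
                              (tk6, rp6), (tk7, rp7), (tk8, rp8)] []
                            tk9 rp9 m (by decide) (by decide) (by decide)
                        have hscan : scanTok ('e' :: 'x' :: 'p' :: '(' :: m)
                            = rp9 ++ scanTok m := by
                          rw [scanTok]
                          simp [pvTokens, List.find?, tk1, tk2, tk3, tk4, tk5, tk6, tk7, tk8,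
                            tk9, List.isPrefixOf]
                        rw [hch, hscan, ih m (by simp only [List.length_cons] at hl; omega)]
                      · -- no token matches at the head
                        have hb : ∀ p ∈ pvTokens, p.1.isPrefixOf (c :: t) = false := by
                          intro p hp
                          fin_cases hp
                          · exact isPrefixOf_false h1
                          · exact isPrefixOf_false h2
                          · exact isPrefixOf_false h3
                          · exact isPrefixOf_false h4
                          · exact isPrefixOf_false h5
                          · exact isPrefixOf_false h6
                          · exact isPrefixOf_false h7
                          · exact isPrefixOf_false h8
                          · exact isPrefixOf_false h9
                        have hch := chain_cons pvTokens c t (by decide) hb (by decide)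
                        have hscan : scanTok (c :: t) = c :: scanTok t := by
                          rw [scanTok]
                          have hn : pvTokens.find? (fun p => p.1.isPrefixOf (c :: t)) = none := by
                            rw [List.find?_eq_none]
                            intro p hp
                            simp [hb p hp]
                          rw [hn]
                        rw [hch, hscan, ih t (by simp only [List.length_cons] at hl; omega)]

-- A's String-level fold equals the char-list chain of clean replace passes.
theorem strFold : ∀ (ps : List (String × String)) (s : String), (∀ p ∈ ps, p.1 ≠ "") →
    ps.foldl (fun latex p => PySem.Str.replace latex p.1 p.2) s
      = String.ofList (chainRep (ps.map fun p => (p.1.toList, p.2.toList)) s.toList) := by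
  intro ps
  induction ps with
  | nil => intro s _; simp [chainRep, String.ofList_toList]
  | cons p ps ih =>
    intro s h
    simp only [List.foldl_cons, List.map_cons]
    rw [ih _ (fun q hq => h q (List.mem_cons_of_mem p hq))]
    congr 1
    show chainRep (ps.map fun p => (p.1.toList, p.2.toList)) (PySem.Str.replace s p.1 p.2).toList
      = chainRep (ps.map fun p => (p.1.toList, p.2.toList)) (repc p.1.toList p.2.toList s.toList)
    congr 1
    rw [PySem.Str.toList_replace]
    exact replace_eq_repc s.toList p.1.toList p.2.toList
      (by
        have := h p List.mem_cons_self
        intro hc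
        exact this (by
          have : p.1.toList = ("" : String).toList := by simpa using hc
          exact String.toList_injective this))

-- ===== VERDICT (by name: the statement is the Claim_ definition above) =====
theorem convert_to_latex_py_spec : Claim_equal_convert_to_latex_py := by
  unfold Claim_equal_convert_to_latex_py
  intro expression _
  unfold Spec_convert_to_latex_py convert_to_latex_py convert_to_latex_py_alt
  by_cases h : expression = ""
  · simp [h]
  · rw [if_neg h, if_neg h]
    rw [strFold pvReplacements _ (by decide)]
    rw [show (pvReplacements.map fun p => (p.1.toList, p.2.toList)) = pvTokens by decide]
    congr 1
    rw [PySem.Str.toList_strip]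
    exact chain_eq_scan _ _ le_rfl
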